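-- pv_equiv track=rewrite | github.com/KonstantinElfimow/crypt_task_6 | my_utils.py | cut_bits_of_number
-- ===== SOURCE A (Python) =====
-- def cut_bits_of_number(value, width_old_big: int, width_new_less: int) -> int:
--     """ Функция создана с целью преобразования из длинных
--         беззнаковых целых чисел в более короткие беззнаковые
--         целые числа """
--     # Преобразование числа в его бинарное представление, начиная с младшего разряда
--     binary = '{:0{width}b}'.format(value, width=width_old_big)[::-1]
--     result: int = 0
--     i = 0
--     while i < len(binary) and i < width_new_less:
--         result += int(binary[i]) * (2 ** i)
--         i += 1
--     return result
-- ===== SOURCE B (Python) =====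
-- def cut_bits_of_number(value, width_old_big: int, width_new_less: int) -> int:
--     """Keep only the lowest width_new_less bits of value (unsigned input)."""
--     if width_new_less <= 0:
--         return 0
--     if width_new_less >= value.bit_length():
--         return value
--     return value & ((1 << width_new_less) - 1)
-- ===== Notes on version B (the rewrite author's own statement) =====
-- stated objective: faster
-- what changed: B replaces A's binary-string formatting, reversal and per-bit while loop by a single constant-size bitwise mask (value & ((1<<k)-1), with an early return when the mask would cover all bits).
-- outside the precondition, e.g. on cut_bits_of_number(-5, 8, 2): A returns 1, B returns 3; on cut_bits_of_number(5, -12, 4): A raises ValueError, B returns 5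
import Mathlib
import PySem

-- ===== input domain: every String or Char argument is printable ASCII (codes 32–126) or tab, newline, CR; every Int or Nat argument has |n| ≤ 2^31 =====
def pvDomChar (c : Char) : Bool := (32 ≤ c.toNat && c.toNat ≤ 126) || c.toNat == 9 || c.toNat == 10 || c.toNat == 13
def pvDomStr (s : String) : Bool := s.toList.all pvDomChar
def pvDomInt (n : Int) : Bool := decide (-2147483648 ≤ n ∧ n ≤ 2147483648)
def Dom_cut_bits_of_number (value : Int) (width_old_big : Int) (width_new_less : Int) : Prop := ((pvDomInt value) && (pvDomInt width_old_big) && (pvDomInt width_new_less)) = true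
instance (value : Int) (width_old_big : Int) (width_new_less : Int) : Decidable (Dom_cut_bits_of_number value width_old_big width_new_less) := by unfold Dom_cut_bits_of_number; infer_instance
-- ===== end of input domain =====

-- B replaces A's binary-string formatting + per-bit while loop by a single bitwise mask (faster, asymptotically).
-- Pre_ excludes negative width_old_big (A's format spec raises ValueError) and negative value: the function is
-- documented for unsigned input, and there A raises ValueError once the loop reaches the sign character and
-- otherwise returns low bits of |value| — a string-formatting artefact — while B masks the two's complement.


-- ===== PORT A =====
-- int(c) for a single binary-digit character (exact on '0'/'1', the only chars reached under Pre_)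
def pvCharInt (c : Char) : Int := (c.toNat : Int) - 48

-- the digits of Python's '{:b}' format of n, least-significant first (hand port of the format builtin;
-- exact for n ≥ 0: repeated division by 2)
def pvBitsLE (n : Nat) : List Char :=
  if h : n = 0 then [] else (if n % 2 = 1 then '1' else '0') :: pvBitsLE (n / 2)
decreasing_by exact Nat.div_lt_self (Nat.pos_of_ne_zero h) (by omega)

-- '{:0{width}b}'.format(v, width=w): binary digits of v, zero-padded on the left to width w
-- (exact for v ≥ 0, w ≥ 0 — Pre_; Python raises ValueError outside)
def pvBinStr (v : Nat) (w : Nat) : List Char :=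
  let digits := if v = 0 then ['0'] else (pvBitsLE v).reverse
  List.replicate (w - digits.length) '0' ++ digits

-- the while loop: i walks up the reversed string while i < len(binary) and i < width_new_less
def pvLoopA : List Char → Int → Nat → Int → Int
  | [], _, _, result => result
  | c :: rest, k, i, result =>
      if (i : Int) < k then pvLoopA rest k (i + 1) (result + pvCharInt c * 2 ^ i) else result

def cut_bits_of_number (value : Int) (width_old_big : Int) (width_new_less : Int) : Int :=
  let binary := (pvBinStr value.toNat width_old_big.toNat).reverse
  pvLoopA binary width_new_less 0 0

-- ===== PORT B =====
def cut_bits_of_number_alt (value : Int) (width_old_big : Int) (width_new_less : Int) : Int :=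
  if width_new_less ≤ 0 then 0
  else if (PySem.Int.bitLength value : Int) ≤ width_new_less then value
  else PySem.Int.band value (((1 : Int) <<< width_new_less.toNat) - 1)

-- ===== PRECONDITION & SPEC =====
-- Pre_ excludes negative width_old_big (A raises ValueError: invalid format spec) and negative value
-- paired with a positive bit count (documented-unsigned input: there A raises ValueError when the loop
-- reaches the '-' character, and otherwise returns low bits of |value|, an artefact of string formatting
-- no caller would specify; with width_new_less ≤ 0 both programs return 0, so those inputs stay inside).
def Pre_cut_bits_of_number (value : Int) (width_old_big : Int) (width_new_less : Int) : Prop :=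
  0 ≤ width_old_big ∧ (0 ≤ value ∨ width_new_less ≤ 0)
instance (value : Int) (width_old_big : Int) (width_new_less : Int) : Decidable (Pre_cut_bits_of_number value width_old_big width_new_less) := by unfold Pre_cut_bits_of_number; infer_instance

def pvWitness_cut_bits_of_number : Int × Int × Int := (13, 8, 3)

def Spec_cut_bits_of_number (value : Int) (width_old_big : Int) (width_new_less : Int) (out : Int) : Prop := out = cut_bits_of_number_alt value width_old_big width_new_less
instance (value : Int) (width_old_big : Int) (width_new_less : Int) (out : Int) : Decidable (Spec_cut_bits_of_number value width_old_big width_new_less out) := by unfold Spec_cut_bits_of_number; infer_instance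

-- ===== CLAIM (what is proved, stated in full; the proofs are below) =====
def Claim_equal_cut_bits_of_number : Prop := ∀ (value : Int) (width_old_big : Int) (width_new_less : Int), Dom_cut_bits_of_number value width_old_big width_new_less → Pre_cut_bits_of_number value width_old_big width_new_less → Spec_cut_bits_of_number value width_old_big width_new_less (cut_bits_of_number value width_old_big width_new_less)

-- ===== LEMMAS AND PROOFS =====

-- little-endian value of a digit string (proof-side characterisation of A's loop)
def pvVal (l : List Char) : Int := l.foldr (fun c acc => pvCharInt c + 2 * acc) 0

theorem pvVal_nil : pvVal [] = 0 := rfl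

theorem pvVal_cons (c : Char) (l : List Char) : pvVal (c :: l) = pvCharInt c + 2 * pvVal l := rfl

theorem pvVal_replicate (p : Nat) : pvVal (List.replicate p '0') = 0 := by
  induction p with
  | zero => rfl
  | succ n ih => simp [List.replicate_succ, pvVal_cons, ih, pvCharInt]

theorem pvLoopA_eq (l : List Char) : ∀ (k : Int) (i : Nat) (r : Int),
    pvLoopA l k i r = r + 2 ^ i * pvVal (l.take (k - i).toNat) := by
  induction l with
  | nil => intro k i r; simp [pvLoopA, pvVal_nil]
  | cons c rest ih =>
    intro k i r
    rw [pvLoopA]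
    by_cases h : (i : Int) < k
    · rw [if_pos h, ih]
      have h1 : (k - i).toNat = (k - (i + 1)).toNat + 1 := by omega
      rw [h1, List.take_succ_cons, pvVal_cons]
      push_cast
      ring
    · rw [if_neg h]
      have h1 : (k - i).toNat = 0 := by omega
      simp [h1, pvVal_nil]

theorem pv_mod_split (v m : Nat) : v % 2 ^ (m + 1) = v % 2 + 2 * (v / 2 % 2 ^ m) := by
  rw [pow_succ', Nat.mod_mul]

theorem pvVal_bits_take (m : Nat) : ∀ (v p : Nat),
    pvVal ((pvBitsLE v ++ List.replicate p '0').take m) = ((v % 2 ^ m : Nat) : Int) := by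
  induction m with
  | zero => intro v p; simp [pvVal_nil]
  | succ m ih =>
    intro v p
    by_cases hv : v = 0
    · subst hv
      have h0 : pvBitsLE 0 = [] := by rw [pvBitsLE]; simp
      simp [h0, List.take_replicate, pvVal_replicate]
    · rw [pvBitsLE, dif_neg hv, List.cons_append, List.take_succ_cons, pvVal_cons, ih]
      have hd : pvCharInt (if v % 2 = 1 then '1' else '0') = ((v % 2 : Nat) : Int) := by
        rcases Nat.mod_two_eq_zero_or_one v with h | h <;> simp [h, pvCharInt]
      rw [hd, pv_mod_split]
      push_cast
      ring

theorem pvBinStr_reverse_zero (w : Nat) :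
    (pvBinStr 0 w).reverse = List.replicate (w - 1 + 1) '0' := by
  unfold pvBinStr
  rw [if_pos rfl]
  simp [List.reverse_append, List.replicate_succ]

theorem pvBinStr_reverse_pos (v w : Nat) (hv : v ≠ 0) :
    (pvBinStr v w).reverse
      = pvBitsLE v ++ List.replicate (w - (pvBitsLE v).reverse.length) '0' := by
  unfold pvBinStr
  rw [if_neg hv]
  simp [List.reverse_append]

-- A computes value mod 2^(width_new_less.toNat)
theorem cut_bits_eq_mod (v w : Nat) (k : Int) :
    cut_bits_of_number (v : Int) (w : Int) k = ((v % 2 ^ k.toNat : Nat) : Int) := by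
  unfold cut_bits_of_number
  simp only [Int.toNat_natCast]
  by_cases hv : v = 0
  · subst hv
    rw [pvBinStr_reverse_zero, pvLoopA_eq, List.take_replicate, pvVal_replicate]
    simp
  · rw [pvBinStr_reverse_pos v w hv, pvLoopA_eq]
    simp only [Nat.cast_zero, sub_zero, pow_zero, one_mul, zero_add]
    exact pvVal_bits_take k.toNat v _

theorem pv_shl_mask (t : Nat) : ((1 : Int) <<< t) - 1 = ((2 ^ t - 1 : Nat) : Int) := by
  have h : ((1 : Int) <<< t) = ((2 ^ t : Nat) : Int) := by
    rw [Int.shiftLeft_eq]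
    push_cast
    ring
  rw [h]
  have : (1 : Nat) ≤ 2 ^ t := Nat.one_le_two_pow
  push_cast [this]
  ring

theorem cut_bits_of_number_spec' (value width_old_big width_new_less : Int)
    (hpre : Pre_cut_bits_of_number value width_old_big width_new_less) :
    cut_bits_of_number value width_old_big width_new_less
      = cut_bits_of_number_alt value width_old_big width_new_less := by
  obtain ⟨hw, hvk⟩ := hpre
  obtain ⟨w, rfl⟩ := Int.eq_ofNat_of_zero_le hw
  rcases hvk with hv | hk
  case inr =>
    -- width_new_less ≤ 0: A's loop body never runs, B returns 0 at once
    unfold cut_bits_of_number cut_bits_of_number_alt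
    rw [if_pos hk, pvLoopA_eq]
    have h0 : width_new_less.toNat = 0 := by omega
    simp [h0, pvVal_nil]
  obtain ⟨v, rfl⟩ := Int.eq_ofNat_of_zero_le hv
  rw [cut_bits_eq_mod]
  unfold cut_bits_of_number_alt
  by_cases hk : width_new_less ≤ 0
  · rw [if_pos hk]
    have : width_new_less.toNat = 0 := by omega
    simp [this]
  · rw [if_neg hk]
    have hbl : ((v : Int)).natAbs < 2 ^ PySem.Int.bitLength (v : Int) :=
      PySem.Int.lt_two_pow_bitLength _
    have hna : ((v : Int)).natAbs = v := rfl
    rw [hna] at hbl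
    by_cases hb : (PySem.Int.bitLength (v : Int) : Int) ≤ width_new_less
    · rw [if_pos hb]
      have hle : PySem.Int.bitLength (v : Int) ≤ width_new_less.toNat := by omega
      have : v < 2 ^ width_new_less.toNat :=
        lt_of_lt_of_le hbl (Nat.pow_le_pow_right (by omega) hle)
      rw [Nat.mod_eq_of_lt this]
    · rw [if_neg hb, pv_shl_mask, PySem.Int.band_natCast,
        Nat.and_two_pow_sub_one_eq_mod]

-- ===== VERDICT (by name: the statement is the Claim_ definition above) =====
theorem cut_bits_of_number_spec : Claim_equal_cut_bits_of_number := by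
  intro value width_old_big width_new_less _ hpre
  exact cut_bits_of_number_spec' value width_old_big width_new_less hpre
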